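-- pv_equiv track=rewrite | github.com/VictoriqueCQ/LeetCode | nowcoder/NC90.设计getMin功能的栈.py | getMinStack
-- ===== SOURCE A (Python) =====
-- def getMinStack(op ):
--     # write code here
--     stack = []
--     res = []
--     for i in op:
--         if i[0] == 1:
--             stack.append(i[1])
--         elif i[0] == 2:
--             stack.pop()
--         elif i[0] ==3:
--             res.append(min(stack))
--     return res
-- ===== SOURCE B (Python) =====
-- def getMinStack(op):
--     # Two-stack min-stack: 'mins' is a monotone auxiliary stack holding each value
--     # that was <= the current minimum when pushed; get-min reads mins[-1] in O(1),
--     # and a pop removes mins[-1] only when the popped value equals it.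
--     stack = []
--     mins = []
--     res = []
--     for c, *args in op:
--         if c == 1:
--             v = args[0]
--             stack.append(v)
--             if not mins or v <= mins[-1]:
--                 mins.append(v)
--         elif c == 2:
--             x = stack.pop()
--             if x == mins[-1]:
--                 mins.pop()
--         elif c == 3:
--             res.append(mins[-1])
--     return res
-- ===== Notes on version B (the rewrite author's own statement) =====
-- stated objective: alternative
-- what changed: B keeps a second monotone stack of current minima (classic two-stack min-stack) updated on push/pop, so a get-min query reads the auxiliary top in O(1) instead of A's min() scan over the whole stack.
import Mathlib
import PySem

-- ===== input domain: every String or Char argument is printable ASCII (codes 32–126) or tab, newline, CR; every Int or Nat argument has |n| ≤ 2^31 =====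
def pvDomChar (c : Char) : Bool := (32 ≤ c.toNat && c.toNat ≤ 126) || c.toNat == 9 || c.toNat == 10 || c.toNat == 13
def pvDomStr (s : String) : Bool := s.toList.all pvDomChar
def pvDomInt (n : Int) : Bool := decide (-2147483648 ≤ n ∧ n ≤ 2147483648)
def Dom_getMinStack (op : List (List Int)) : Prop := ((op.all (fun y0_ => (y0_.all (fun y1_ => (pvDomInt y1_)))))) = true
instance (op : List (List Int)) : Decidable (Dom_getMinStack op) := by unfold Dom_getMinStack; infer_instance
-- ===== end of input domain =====

-- B replaces A's min() scan per get-min query by a second monotone stack of current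
-- minima (two-stack min-stack), updated on push/pop (alternative algorithm).


-- ===== PORT A =====
-- literal port of A: a single stack of Ints; a get-min query scans it with min().
-- The 'none' branches mark the places where the Python raises (IndexError on i[0]/i[1]/pop
-- of empty, ValueError on min([])); those inputs are excluded by Pre_getMinStack.
def getMinStack (op : List (List Int)) : List Int :=
  (op.foldl (fun (st : List Int × List Int) i =>
    match PySem.List.pyGet? i 0 with
    | none => st
    | some c =>
      if c = 1 then
        match PySem.List.pyGet? i 1 with
        | some v => (st.1 ++ [v], st.2)
        | none => st
      else if c = 2 then
        (st.1.dropLast, st.2)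
      else if c = 3 then
        match PySem.List.min? st.1 (fun x => x) with
        | some m => (st.1, st.2 ++ [m])
        | none => st
      else st) ([], [])).2

-- ===== PORT B =====
-- literal port of B: main stack plus a monotone auxiliary stack 'mins'.
-- 'for c, *args in op' unpacks (raises on an empty sublist → '[]' branch keeps state;
-- those inputs are outside Pre_); 'mins[-1]' on an empty mins likewise (outside Pre_).
def getMinStack_alt (op : List (List Int)) : List Int :=
  (op.foldl (fun (st : List Int × List Int × List Int) o =>
    match o with
    | [] => st
    | c :: args =>
      let (stack, mins, res) := st
      if c = 1 then
        match PySem.List.pyGet? args 0 with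
        | some v =>
          (stack ++ [v],
           (match mins.getLast? with
            | none => mins ++ [v]
            | some m => if v ≤ m then mins ++ [v] else mins), res)
        | none => st
      else if c = 2 then
        match stack.getLast? with
        | some x =>
          (stack.dropLast,
           (if mins.getLast? = some x then mins.dropLast else mins), res)
        | none => st
      else if c = 3 then
        match mins.getLast? with
        | some m => (stack, mins, res ++ [m])
        | none => st
      else st) ([], [], [])).2.2

-- ===== PRECONDITION & SPEC =====
-- net number of pushes minus pops in a prefix = stack size there
def pvNet (l : List (List Int)) : Int :=
  (l.countP (fun i => i.head? = some 1) : Int) - (l.countP (fun i => i.head? = some 2) : Int)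

-- Pre_ excludes exactly the inputs where Python A raises: an empty operation (IndexError on
-- i[0]), a push without an argument (IndexError on i[1]), or a pop/get-min on an empty stack
-- (IndexError / ValueError).
def Pre_getMinStack (op : List (List Int)) : Prop :=
  ∀ k, (h : k < op.length) →
    op[k] ≠ [] ∧
    (op[k].head? = some 1 → 2 ≤ op[k].length) ∧
    ((op[k].head? = some 2 ∨ op[k].head? = some 3) → 1 ≤ pvNet (op.take k))
instance (op : List (List Int)) : Decidable (Pre_getMinStack op) := by
  unfold Pre_getMinStack; infer_instance

def pvWitness_getMinStack : List (List Int) := [[1, 3], [1, 2], [3], [2], [3]]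

def Spec_getMinStack (op : List (List Int)) (out : List Int) : Prop := out = getMinStack_alt op
instance (op : List (List Int)) (out : List Int) : Decidable (Spec_getMinStack op out) := by unfold Spec_getMinStack; infer_instance

-- ===== CLAIM (what is proved, stated in full; the proofs are below) =====
def Claim_equal_getMinStack : Prop := ∀ (op : List (List Int)), Dom_getMinStack op → Pre_getMinStack op → Spec_getMinStack op (getMinStack op)

-- ===== LEMMAS AND PROOFS =====

-- the monotone min-stack determined by a plain stack (bottom first)
def pvMinsStep (acc : List Int) (v : Int) : List Int :=
  match acc.getLast? with
  | none => acc ++ [v]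
  | some m => if v ≤ m then acc ++ [v] else acc

def pvMins (s : List Int) : List Int := s.foldl pvMinsStep []

theorem pvMins_append (s : List Int) (v : Int) :
    pvMins (s ++ [v]) = pvMinsStep (pvMins s) v := by
  unfold pvMins; rw [List.foldl_append]; rfl

-- last of pvMins = min of the stack (running-min characterisation)
theorem pvMins_last (x : Int) (t : List Int) :
    (pvMins (x :: t)).getLast? = some (t.foldl min x) := by
  induction t using List.reverseRecOn with
  | nil => simp [pvMins, pvMinsStep]
  | append_singleton r v ih =>
      have h : x :: (r ++ [v]) = (x :: r) ++ [v] := by simp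
      rw [h, pvMins_append, pvMinsStep, ih, List.foldl_append]
      by_cases hv : v ≤ r.foldl min x
      · simp [hv]
      · have hm : min (r.foldl min x) v = r.foldl min x :=
          min_eq_left (le_of_lt (lt_of_not_ge hv))
        simp [hv, hm, ih]

-- popping the main stack pops the min-stack exactly when the tops agree
theorem pvMins_dropLast (s : List Int) (x : Int) (hx : s.getLast? = some x) :
    pvMins s.dropLast =
      (if (pvMins s).getLast? = some x then (pvMins s).dropLast else pvMins s) := by
  induction s using List.reverseRecOn with
  | nil => simp at hx
  | append_singleton t v _ =>
      have hvx : v = x := by simpa using hx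
      subst hvx
      rw [pvMins_append, List.dropLast_concat, pvMinsStep]
      cases hL : (pvMins t).getLast? with
      | none =>
          have ht : pvMins t = [] := by
            cases htt : pvMins t with
            | nil => rfl
            | cons a b => rw [htt] at hL; simp at hL
          simp [ht]
      | some m =>
          by_cases hv : v ≤ m
          · simp [hv]
          · have hne : ¬ ((pvMins t).getLast? = some v) := by
              rw [hL]; intro h
              exact hv (by simpa using (le_of_eq (Option.some.inj h).symm))
            simp [hv, hne]

-- one step of either fold, named for reuse
def pvStepA (st : List Int × List Int) (i : List Int) : List Int × List Int :=
  match PySem.List.pyGet? i 0 with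
  | none => st
  | some c =>
    if c = 1 then
      match PySem.List.pyGet? i 1 with
      | some v => (st.1 ++ [v], st.2)
      | none => st
    else if c = 2 then
      (st.1.dropLast, st.2)
    else if c = 3 then
      match PySem.List.min? st.1 (fun x => x) with
      | some m => (st.1, st.2 ++ [m])
      | none => st
    else st

def pvStepB (st : List Int × List Int × List Int) (o : List Int) :
    List Int × List Int × List Int :=
  match o with
  | [] => st
  | c :: args =>
    let (stack, mins, res) := st
    if c = 1 then
      match PySem.List.pyGet? args 0 with
      | some v =>
        (stack ++ [v],
         (match mins.getLast? with
          | none => mins ++ [v]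
          | some m => if v ≤ m then mins ++ [v] else mins), res)
      | none => st
    else if c = 2 then
      match stack.getLast? with
      | some x =>
        (stack.dropLast,
         (if mins.getLast? = some x then mins.dropLast else mins), res)
      | none => st
    else if c = 3 then
      match mins.getLast? with
      | some m => (stack, mins, res ++ [m])
      | none => st
    else st

-- the B-state is always (stack, pvMins stack, res) when the A-state is (stack, res);
-- on every guard branch both steps are no-ops, so the invariant needs no precondition.
theorem pvStep_inv (s r : List Int) (i : List Int) :
    pvStepB (s, pvMins s, r) i =
      ((pvStepA (s, r) i).1, pvMins (pvStepA (s, r) i).1, (pvStepA (s, r) i).2) := by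
  cases i with
  | nil => simp [pvStepA, pvStepB, PySem.List.pyGet?, PySem.List.pyIdx?]
  | cons c args =>
    have hg : PySem.List.pyGet? (c :: args) 0 = some c := by
      simp [PySem.List.pyGet?, PySem.List.pyIdx?]
    have hargs : PySem.List.pyGet? (c :: args) 1 = PySem.List.pyGet? args 0 := by
      cases args <;> simp [PySem.List.pyGet?, PySem.List.pyIdx?]
    simp only [pvStepA, pvStepB, hg, hargs]
    by_cases h1 : c = 1
    · simp only [eq_true_intro h1, if_true]
      cases hv : PySem.List.pyGet? args 0 with
      | none => simp
      | some v => simp [pvMins_append, pvMinsStep]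
    · simp only [eq_false h1, if_false]
      by_cases h2 : c = 2
      · simp only [eq_true_intro h2, if_true]
        cases hx : s.getLast? with
        | none =>
            have hs : s = [] := by
              cases s with
              | nil => rfl
              | cons a b => simp [List.getLast?] at hx
            simp [hs, pvMins]
        | some x => simp [pvMins_dropLast s x hx]
      · simp only [eq_false h2, if_false]
        by_cases h3 : c = 3
        · simp only [eq_true_intro h3, if_true]
          cases s with
          | nil => simp [pvMins, PySem.List.min?]
          | cons x t => simp [pvMins_last, PySem.List.min?_id_cons]
        · simp only [eq_false h3, if_false]

theorem pvFold_inv (op : List (List Int)) (s r : List Int) :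
    (op.foldl pvStepB (s, pvMins s, r)).2.2 = (op.foldl pvStepA (s, r)).2 := by
  induction op generalizing s r with
  | nil => rfl
  | cons i rest ih =>
      simp only [List.foldl_cons]
      rw [pvStep_inv s r i]
      exact ih _ _

theorem getMinStack_eq (op : List (List Int)) :
    getMinStack op = getMinStack_alt op := by
  unfold getMinStack getMinStack_alt
  have hA : (fun (st : List Int × List Int) i => match PySem.List.pyGet? i 0 with
    | none => st
    | some c =>
      if c = 1 then
        match PySem.List.pyGet? i 1 with
        | some v => (st.1 ++ [v], st.2)
        | none => st
      else if c = 2 then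
        (st.1.dropLast, st.2)
      else if c = 3 then
        match PySem.List.min? st.1 (fun x => x) with
        | some m => (st.1, st.2 ++ [m])
        | none => st
      else st) = pvStepA := rfl
  have hB : (fun (st : List Int × List Int × List Int) o => match o with
    | [] => st
    | c :: args =>
      let (stack, mins, res) := st
      if c = 1 then
        match PySem.List.pyGet? args 0 with
        | some v =>
          (stack ++ [v],
           (match mins.getLast? with
            | none => mins ++ [v]
            | some m => if v ≤ m then mins ++ [v] else mins), res)
        | none => st
      else if c = 2 then
        match stack.getLast? with
        | some x =>
          (stack.dropLast,
           (if mins.getLast? = some x then mins.dropLast else mins), res)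
        | none => st
      else if c = 3 then
        match mins.getLast? with
        | some m => (stack, mins, res ++ [m])
        | none => st
      else st) = pvStepB := rfl
  rw [hA, hB]
  rw [show (([], [], []) : List Int × List Int × List Int) = ([], pvMins [], []) from rfl]
  exact (pvFold_inv op [] []).symm

-- ===== VERDICT (by name: the statement is the Claim_ definition above) =====
theorem getMinStack_spec : Claim_equal_getMinStack := by
  intro op _ _
  unfold Spec_getMinStack
  exact getMinStack_eq op
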